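-- pv_equiv track=rewrite | github.com/Dedzsinator/pyHMSSQL | server/execution_engine.py | _execute_max
-- ===== SOURCE A (Python) =====
-- def _execute_max(result, actual_column, column):
--     """Execute MAX aggregate function."""
--     if column == "*":
--         raise ValueError("Cannot use MAX with *")
--     if not actual_column:
--         raise ValueError(f"Column '{column}' not found")
--
--     values = []
--     for record in result:
--         if actual_column in record and record[actual_column] is not None:
--             values.append(record[actual_column])
--     return max(values) if values else None
-- ===== SOURCE B (Python) =====
-- def _execute_max(result, actual_column, column):
--     """Execute MAX aggregate by divide and conquer over index ranges."""
--     if column == "*":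
--         raise ValueError("Cannot use MAX with *")
--     if not actual_column:
--         raise ValueError(f"Column '{column}' not found")
--     return _max_range(result, 0, len(result), actual_column)
--
--
-- def _max_range(result, lo, hi, actual_column):
--     """Maximum of the present values among records result[lo:hi], left-biased on ties."""
--     if hi - lo <= 0:
--         return None
--     if hi - lo == 1:
--         record = result[lo]
--         if actual_column in record and record[actual_column] is not None:
--             return record[actual_column]
--         return None
--     mid = (lo + hi) // 2
--     left = _max_range(result, lo, mid, actual_column)
--     right = _max_range(result, mid, hi, actual_column)
--     if left is None:
--         return right
--     if right is None:
--         return left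
--     return left if left >= right else right
-- ===== Notes on version B (the rewrite author's own statement) =====
-- stated objective: alternative
-- what changed: Replaces the linear build-a-values-list-then-max() pass with a recursive divide-and-conquer over index ranges: split the record range in half, compute each half's maximum recursively, and combine the two optional maxima (left-biased, so ties resolve as max() does).
-- outside the precondition, e.g. on _execute_max([{'a': 1}], 'a', '*'): A raises ValueError, B raises ValueError; on _execute_max([{'a': 1}], '', 'a'): A raises ValueError, B raises ValueError
import Mathlib
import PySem

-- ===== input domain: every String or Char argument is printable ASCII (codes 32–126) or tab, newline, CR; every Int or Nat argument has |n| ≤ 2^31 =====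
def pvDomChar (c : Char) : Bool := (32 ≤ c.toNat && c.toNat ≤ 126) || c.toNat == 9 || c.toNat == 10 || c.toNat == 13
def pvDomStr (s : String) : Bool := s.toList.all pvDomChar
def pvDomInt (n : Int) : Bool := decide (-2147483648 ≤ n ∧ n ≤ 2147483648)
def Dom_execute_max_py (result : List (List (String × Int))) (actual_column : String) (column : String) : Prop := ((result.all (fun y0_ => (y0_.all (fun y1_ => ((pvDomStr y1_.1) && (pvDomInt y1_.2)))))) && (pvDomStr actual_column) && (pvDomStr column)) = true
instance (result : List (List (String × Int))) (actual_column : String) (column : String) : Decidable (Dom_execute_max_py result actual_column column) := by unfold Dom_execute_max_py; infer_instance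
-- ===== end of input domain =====

-- B replaces A's build-a-values-list-then-max() pass with a recursive
-- divide-and-conquer over index ranges, combining the halves' optional maxima
-- left-biased (objective: alternative decomposition, same O(n) cost).

-- ===== PORT A =====
-- A raises ValueError when column == "*" or actual_column is empty; those inputs
-- are excluded by Pre_ below and the port returns none there (value never claimed).
def execute_max_py (result : List (List (String × Int))) (actual_column : String) (column : String) : Option Int :=
  if column == "*" then none
  else if actual_column == "" then none
  else
    -- values = []; for record in result: if actual_column in record: values.append(record[actual_column])
    -- (values are Int here, so the `is not None` test is always true)
    let values : List Int := result.foldl (fun acc record =>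
      match record.find? (fun p => p.1 == actual_column) with
      | some p => acc ++ [p.2]
      | none => acc) []
    -- max(values) if values else None
    PySem.List.max? values (fun x => x)

-- ===== PORT B =====
-- _max_range(result, lo, hi, actual_column); lo, hi are the nonnegative range
-- bounds, so they are carried as Nat; indexing result[lo] is always in range.
def max_range (result : List (List (String × Int))) (lo hi : Nat) (actual_column : String) : Option Int :=
  if hi - lo ≤ 0 then none
  else if hi - lo = 1 then
    match result[lo]? with
    | none => none   -- unreachable: lo < hi ≤ len(result)
    | some record =>
      match record.find? (fun p => p.1 == actual_column) with
      | some p => some p.2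
      | none => none
  else
    let mid := (lo + hi) / 2
    let left := max_range result lo mid actual_column
    let right := max_range result mid hi actual_column
    match left, right with
    | none, r => r
    | some l, none => some l
    | some l, some r => if l ≥ r then some l else some r
termination_by hi - lo
decreasing_by all_goals omega

def execute_max_py_alt (result : List (List (String × Int))) (actual_column : String) (column : String) : Option Int :=
  if column == "*" then none
  else if actual_column == "" then none
  else max_range result 0 result.length actual_column

-- ===== PRECONDITION & SPEC =====
-- Pre_ excludes exactly the inputs where A raises ValueError: column == "*" or empty actual_column.
def Pre_execute_max_py (result : List (List (String × Int))) (actual_column : String) (column : String) : Prop :=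
  column ≠ "*" ∧ actual_column ≠ ""
instance (result : List (List (String × Int))) (actual_column : String) (column : String) : Decidable (Pre_execute_max_py result actual_column column) := by unfold Pre_execute_max_py; infer_instance

def pvWitness_execute_max_py : (List (List (String × Int))) × String × String :=
  ([[("a", 3), ("b", 1)], [("a", 7)]], "a", "a")

def Spec_execute_max_py (result : List (List (String × Int))) (actual_column : String) (column : String) (out : Option Int) : Prop := out = execute_max_py_alt result actual_column column
instance (result : List (List (String × Int))) (actual_column : String) (column : String) (out : Option Int) : Decidable (Spec_execute_max_py result actual_column column out) := by unfold Spec_execute_max_py; infer_instance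

-- ===== CLAIM (what is proved, stated in full; the proofs are below) =====
def Claim_equal_execute_max_py : Prop := ∀ (result : List (List (String × Int))) (actual_column : String) (column : String), Dom_execute_max_py result actual_column column → Pre_execute_max_py result actual_column column → Spec_execute_max_py result actual_column column (execute_max_py result actual_column column)

-- ===== LEMMAS AND PROOFS =====

-- the list of present values of a record list, structurally
def vals (ac : String) : List (List (String × Int)) → List Int
  | [] => []
  | r :: t =>
      (match r.find? (fun p => p.1 == ac) with
       | some p => [p.2]
       | none => []) ++ vals ac t

theorem vals_append (ac : String) (xs ys : List (List (String × Int))) :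
    vals ac (xs ++ ys) = vals ac xs ++ vals ac ys := by
  induction xs with
  | nil => rfl
  | cons r t ih => simp [vals, ih]

-- A's foldl accumulation is vals
theorem foldl_vals (ac : String) (l : List (List (String × Int))) (acc : List Int) :
    l.foldl (fun acc record =>
      match record.find? (fun p => p.1 == ac) with
      | some p => acc ++ [p.2]
      | none => acc) acc = acc ++ vals ac l := by
  induction l generalizing acc with
  | nil => simp [vals]
  | cons r t ih =>
      simp only [List.foldl, vals]
      cases h : r.find? (fun p => p.1 == ac) with
      | none => simp [ih]
      | some p => simp [ih]

theorem foldl_max_cons (m y : Int) (u : List Int) :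
    List.foldl max m (y :: u) = max m (List.foldl max y u) := by
  induction u generalizing m y with
  | nil => simp
  | cons z u ih =>
      calc List.foldl max m (y :: z :: u) = List.foldl max (max m y) (z :: u) := rfl
        _ = max (max m y) (List.foldl max z u) := ih (max m y) z
        _ = max m (max y (List.foldl max z u)) := max_assoc m y _
        _ = max m (List.foldl max y (z :: u)) := by rw [ih y z]

-- max? over an append is the left-biased combination of the halves' max?
theorem max?_id_append (a b : List Int) :
    PySem.List.max? (a ++ b) (fun x => x) =
      match PySem.List.max? a (fun x => x), PySem.List.max? b (fun x => x) with
      | none, r => r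
      | some l, none => some l
      | some l, some r => if l ≥ r then some l else some r := by
  cases a with
  | nil =>
      rw [List.nil_append]
      cases h : PySem.List.max? b (fun x => x) <;> rfl
  | cons x t =>
      cases b with
      | nil => rw [List.append_nil, PySem.List.max?_id_cons]; rfl
      | cons y u =>
          rw [List.cons_append, PySem.List.max?_id_cons, PySem.List.max?_id_cons,
              PySem.List.max?_id_cons, List.foldl_append, foldl_max_cons]
          have hif : max (List.foldl max x t) (List.foldl max y u) =
              if List.foldl max x t ≥ List.foldl max y u then List.foldl max x t
              else List.foldl max y u := by
            rw [max_def]; split_ifs <;> omega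
          have hred : (match (some (List.foldl max x t) : Option Int),
                (some (List.foldl max y u) : Option Int) with
              | none, r => r
              | some l, none => some l
              | some l, some r => if l ≥ r then some l else some r) =
              if List.foldl max x t ≥ List.foldl max y u
              then (some (List.foldl max x t) : Option Int)
              else some (List.foldl max y u) := rfl
          rw [hif, hred]
          split_ifs <;> rfl

-- B's range recursion computes max? of vals on the corresponding segment
theorem max_range_eq (ac : String) (xs : List (List (String × Int))) :
    ∀ n lo hi, hi - lo = n → hi ≤ xs.length →
      max_range xs lo hi ac =
        PySem.List.max? (vals ac ((xs.drop lo).take (hi - lo))) (fun x => x) := by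
  intro n
  induction n using Nat.strong_induction_on with
  | _ n ih =>
    intro lo hi hn hlen
    rw [max_range]
    by_cases h0 : hi - lo ≤ 0
    · simp only [if_pos h0]
      have : hi - lo = 0 := by omega
      simp [this, vals, PySem.List.max?]
    · rw [if_neg h0]
      by_cases h1 : hi - lo = 1
      · rw [if_pos h1]
        have hlt : lo < xs.length := by omega
        have hdrop : xs.drop lo = xs[lo] :: xs.drop (lo + 1) :=
          List.drop_eq_getElem_cons hlt
        rw [h1, hdrop]
        simp only [List.take, List.getElem?_eq_getElem hlt]
        cases h : xs[lo].find? (fun p => p.1 == ac) with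
        | none => simp [vals, h, PySem.List.max?]
        | some p => simp [vals, h, PySem.List.max?]
      · rw [if_neg h1]
        have h2 : 2 ≤ hi - lo := by omega
        set mid := (lo + hi) / 2 with hmid
        have hb : lo < mid ∧ mid < hi := by omega
        have hseg : (xs.drop lo).take (hi - lo) =
            (xs.drop lo).take (mid - lo) ++ (xs.drop mid).take (hi - mid) := by
          have : hi - lo = (mid - lo) + (hi - mid) := by omega
          rw [this, List.take_add, List.drop_drop]
          have : lo + (mid - lo) = mid := by omega
          rw [this]
        rw [hseg, vals_append, max?_id_append,
            ← ih (mid - lo) (by omega) lo mid rfl (by omega),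
            ← ih (hi - mid) (by omega) mid hi rfl hlen]

-- ===== VERDICT (by name: the statement is the Claim_ definition above) =====
theorem execute_max_py_spec : Claim_equal_execute_max_py := by
  intro result ac col _ hpre
  obtain ⟨h1, h2⟩ := hpre
  unfold Spec_execute_max_py execute_max_py execute_max_py_alt
  rw [if_neg (by simpa using h1), if_neg (by simpa using h2),
      if_neg (by simpa using h1), if_neg (by simpa using h2)]
  rw [max_range_eq ac result (result.length - 0) 0 result.length rfl (le_refl _)]
  simp [foldl_vals]
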